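-- pv_equiv track=rewrite | github.com/EleutherAI/polyapprox | experiments/2l_mnist.py | nk_weave
-- ===== SOURCE A (Python) =====
-- def nk_weave(comb, List1, List2):
--     n = len(List1)
--     assert len(List1) == len(List2)
--     new_list = []
--     for i in range(n):
--         if i in comb:
--             new_list.append(List1[i])
--         else:
--             new_list.append(List2[i])
--     return new_list
-- ===== SOURCE B (Python) =====
-- def nk_weave(comb, List1, List2):
--     n = len(List1)
--     assert len(List1) == len(List2)
--     new_list = list(List2)
--     for i in comb:
--         if 0 <= i < n:
--             new_list[i] = List1[i]
--     return new_list
-- ===== Notes on version B (the rewrite author's own statement) =====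
-- stated objective: faster
-- what changed: B defaults to a copy of List2 and overwrites only the comb-selected in-range positions in one sparse pass over comb, instead of scanning every index with an 'i in comb' membership test.
import Mathlib
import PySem

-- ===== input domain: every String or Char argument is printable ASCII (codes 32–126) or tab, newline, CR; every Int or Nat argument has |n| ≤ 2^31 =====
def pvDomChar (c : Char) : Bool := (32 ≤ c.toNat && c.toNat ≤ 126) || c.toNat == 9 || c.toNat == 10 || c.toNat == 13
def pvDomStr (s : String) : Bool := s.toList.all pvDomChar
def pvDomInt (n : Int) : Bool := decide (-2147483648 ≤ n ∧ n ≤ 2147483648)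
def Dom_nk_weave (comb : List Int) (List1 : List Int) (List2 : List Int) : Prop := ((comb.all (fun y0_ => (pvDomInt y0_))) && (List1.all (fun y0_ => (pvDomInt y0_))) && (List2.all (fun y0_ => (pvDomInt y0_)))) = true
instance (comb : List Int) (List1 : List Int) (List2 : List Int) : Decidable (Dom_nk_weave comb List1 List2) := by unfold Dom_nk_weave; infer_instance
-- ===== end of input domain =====

-- B replaces A's dense per-index 'i in comb' membership scan by a copy of List2
-- with a sparse overwrite pass over comb (objective: simpler).


-- ===== PORT A =====
-- for i in range(n): append List1[i] if i in comb else List2[i]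
def nk_weave (comb : List Int) (List1 : List Int) (List2 : List Int) : List Int :=
  (PySem.List.pyRange 0 (List1.length : Int) 1).foldl
    (fun new_list i =>
      if comb.contains i then
        new_list ++ [PySem.List.pyGetD List1 i 0]
      else
        new_list ++ [PySem.List.pyGetD List2 i 0])
    []

-- ===== PORT B =====
-- new_list = list(List2); for i in comb: if 0 <= i < n: new_list[i] = List1[i]
def nk_weave_alt (comb : List Int) (List1 : List Int) (List2 : List Int) : List Int :=
  comb.foldl
    (fun new_list i =>
      if 0 ≤ i ∧ i < (List1.length : Int) then
        new_list.set i.toNat (PySem.List.pyGetD List1 i 0)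
      else
        new_list)
    List2

-- ===== PRECONDITION & SPEC =====
-- Pre_ excludes exactly the inputs where A's assert fails (AssertionError): unequal lengths.
def Pre_nk_weave (_comb : List Int) (List1 : List Int) (List2 : List Int) : Prop :=
  List1.length = List2.length
instance (comb : List Int) (List1 : List Int) (List2 : List Int) : Decidable (Pre_nk_weave comb List1 List2) := by unfold Pre_nk_weave; infer_instance

def pvWitness_nk_weave : List Int × List Int × List Int := ([0, 2], [10, 11, 12], [20, 21, 22])

def Spec_nk_weave (comb : List Int) (List1 : List Int) (List2 : List Int) (out : List Int) : Prop := out = nk_weave_alt comb List1 List2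
instance (comb : List Int) (List1 : List Int) (List2 : List Int) (out : List Int) : Decidable (Spec_nk_weave comb List1 List2 out) := by unfold Spec_nk_weave; infer_instance

-- ===== CLAIM (what is proved, stated in full; the proofs are below) =====
def Claim_equal_nk_weave : Prop := ∀ (comb : List Int) (List1 : List Int) (List2 : List Int), Dom_nk_weave comb List1 List2 → Pre_nk_weave comb List1 List2 → Spec_nk_weave comb List1 List2 (nk_weave comb List1 List2)

-- ===== LEMMAS AND PROOFS =====

-- A's output is the map over range of the per-index selection.
theorem nk_weave_eq_map (comb List1 List2 : List Int) :
    nk_weave comb List1 List2 =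
      (List.range List1.length).map
        (fun (j : Nat) => if comb.contains (j : Int) then List1.getD j 0 else List2.getD j 0) := by
  unfold nk_weave
  rw [PySem.List.pyRange_zero_nat]
  rw [show (fun (new_list : List Int) (i : Int) =>
        if comb.contains i then new_list ++ [PySem.List.pyGetD List1 i 0]
        else new_list ++ [PySem.List.pyGetD List2 i 0])
      = (fun new_list i => new_list ++ [if comb.contains i then PySem.List.pyGetD List1 i 0
          else PySem.List.pyGetD List2 i 0]) by
        funext nl i; split <;> rfl]
  rw [PySem.List.foldl_append_singleton_eq_map]
  simp [PySem.List.pyGetD_natCast]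

-- B's fold keeps the length of the accumulator.
theorem alt_foldl_length (List1 : List Int) (comb : List Int) (acc : List Int) :
    (comb.foldl
      (fun new_list i =>
        if 0 ≤ i ∧ i < (List1.length : Int) then
          new_list.set i.toNat (PySem.List.pyGetD List1 i 0)
        else new_list) acc).length = acc.length := by
  induction comb generalizing acc with
  | nil => rfl
  | cons c rest ih =>
      simp only [List.foldl_cons]
      rw [ih]
      split <;> simp

-- Element characterisation of B's fold (for accumulators of List1's length).
theorem alt_foldl_getElem (List1 : List Int) (comb : List Int) (acc : List Int)
    (hacc : acc.length = List1.length) (j : Nat) (hj : j < acc.length)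
    (hj' : j < (comb.foldl
      (fun new_list i =>
        if 0 ≤ i ∧ i < (List1.length : Int) then
          new_list.set i.toNat (PySem.List.pyGetD List1 i 0)
        else new_list) acc).length) :
    (comb.foldl
      (fun new_list i =>
        if 0 ≤ i ∧ i < (List1.length : Int) then
          new_list.set i.toNat (PySem.List.pyGetD List1 i 0)
        else new_list) acc)[j] =
      if comb.contains (j : Int) then List1.getD j 0 else acc[j] := by
  induction comb generalizing acc with
  | nil => simp
  | cons c rest ih =>
      simp only [List.foldl_cons]
      have hlen : (if 0 ≤ c ∧ c < (List1.length : Int) then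
          acc.set c.toNat (PySem.List.pyGetD List1 c 0) else acc).length = List1.length := by
        split <;> simp [hacc]
      have hj2 : j < (if 0 ≤ c ∧ c < (List1.length : Int) then
          acc.set c.toNat (PySem.List.pyGetD List1 c 0) else acc).length := by
        rw [hlen, ← hacc]; exact hj
      rw [ih _ hlen hj2 (by rw [alt_foldl_length]; exact hj2)]
      by_cases hc : c = (j : Int)
      · subst hc
        have hguard : 0 ≤ (j : Int) ∧ (j : Int) < (List1.length : Int) := by
          refine ⟨Int.natCast_nonneg j, ?_⟩
          exact_mod_cast hacc ▸ hj
        have hjl : j < List1.length := hacc ▸ hj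
        by_cases hr : rest.contains (j : Int)
        · simp only [hr, List.contains_cons, Bool.or_eq_true, beq_self_eq_true,
            true_or, List.getD_eq_getElem _ _ hjl, if_true]
        · simp
          intro _
          simp [hjl]
      · have helem : (if 0 ≤ c ∧ c < (List1.length : Int) then
            acc.set c.toNat (PySem.List.pyGetD List1 c 0) else acc)[j]'hj2 = acc[j] := by
          split
          · rw [List.getElem_set_ne]
            intro h
            exact hc (by omega)
          · rfl
        rw [helem]
        by_cases hr : (j : Int) ∈ rest
        · simp [hr]
        · have hne2 : ¬ ((j : Int) = c) := fun h => hc h.symm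
          simp [hr, hne2]

-- ===== VERDICT (by name: the statement is the Claim_ definition above) =====
theorem nk_weave_spec : Claim_equal_nk_weave := by
  intro comb List1 List2 _ hpre
  have hpre' : List1.length = List2.length := hpre
  unfold Spec_nk_weave
  rw [nk_weave_eq_map]
  unfold nk_weave_alt
  apply List.ext_getElem
  · rw [alt_foldl_length]
    simpa using hpre'
  · intro j hj1 hj2
    have hlen2 : List2.length = List1.length := hpre'.symm
    rw [alt_foldl_getElem List1 comb List2 hlen2 j (by rw [alt_foldl_length] at hj2; exact hj2) hj2]
    simp only [List.getElem_map, List.getElem_range]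
    have hjn : j < List1.length := by simpa using hj1
    split
    · rw [List.getD_eq_getElem _ _ hjn]
    · rw [List.getD_eq_getElem _ _ (by omega)]
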